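-- pv_equiv track=rewrite | github.com/vigneshsabapathi/python-algorithms | boolean_algebra/karnaugh_map_simplification_optimized.py | bitfield_encode
-- ===== SOURCE A (Python) =====
-- _BITFIELD_TABLE = {
--     0b0000: "",
--     0b0001: "A'B'",
--     0b0010: "A'B",
--     0b0100: "AB'",
--     0b1000: "AB",
-- }
--
-- def bitfield_encode(kmap: list[list[int]]) -> str:
--     """
--     Encode 2x2 K-map as a 4-bit integer, then collect terms by set bits.
--     Bit positions: [A'B', A'B, AB', AB] -> bits [0,1,2,3].
--
--     >>> bitfield_encode([[0, 1], [1, 1]])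
--     "A'B + AB' + AB"
--     >>> bitfield_encode([[0, 0], [0, 0]])
--     ''
--     >>> bitfield_encode([[1, 0], [0, 0]])
--     "A'B'"
--     """
--     bits = 0
--     if kmap[0][0]: bits |= 0b0001
--     if kmap[0][1]: bits |= 0b0010
--     if kmap[1][0]: bits |= 0b0100
--     if kmap[1][1]: bits |= 0b1000
--     terms = []
--     for mask in (0b0001, 0b0010, 0b0100, 0b1000):
--         if bits & mask:
--             terms.append(_BITFIELD_TABLE[mask])
--     return " + ".join(terms)
-- ===== SOURCE B (Python) =====
-- def bitfield_encode(kmap: list[list[int]]) -> str: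
--     labels = ((0, 0, "A'B'"), (0, 1, "A'B"), (1, 0, "AB'"), (1, 1, "AB"))
--     return " + ".join(lbl for i, j, lbl in labels if kmap[i][j])
-- ===== Notes on version B (the rewrite author's own statement) =====
-- stated objective: simpler
-- what changed: Dropped the 4-bit integer encode/decode round trip and the mask table: B lists the four cells with their labels positionally and joins the labels of truthy cells in one pass.
import Mathlib
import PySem

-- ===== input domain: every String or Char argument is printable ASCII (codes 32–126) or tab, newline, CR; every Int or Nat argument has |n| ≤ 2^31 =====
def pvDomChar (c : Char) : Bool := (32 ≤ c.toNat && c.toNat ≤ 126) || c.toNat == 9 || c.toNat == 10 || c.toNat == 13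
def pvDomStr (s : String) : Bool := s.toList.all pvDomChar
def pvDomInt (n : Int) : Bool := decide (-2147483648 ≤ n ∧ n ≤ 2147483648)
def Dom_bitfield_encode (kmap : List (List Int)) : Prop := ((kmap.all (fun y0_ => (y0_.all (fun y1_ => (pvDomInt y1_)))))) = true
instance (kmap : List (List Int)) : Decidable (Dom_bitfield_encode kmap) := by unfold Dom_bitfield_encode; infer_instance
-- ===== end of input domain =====

-- B drops A's integer-bitfield encode/decode round trip: it reads the four cells positionally and joins their labels in one pass (objective: simpler).

-- ===== PORT A =====
-- kmap[i][j] as Python computes it; 'none' = IndexError (excluded by Pre_); default 0 never used inside Pre_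
def pvCell (kmap : List (List Int)) (i j : Int) : Int :=
  ((PySem.List.pyGet? kmap i).bind (fun r => PySem.List.pyGet? r j)).getD 0

def pvBitfieldTable (mask : Int) : String :=
  if mask = 1 then "A'B'" else if mask = 2 then "A'B" else if mask = 4 then "AB'"
  else if mask = 8 then "AB" else ""

def bitfield_encode (kmap : List (List Int)) : String :=
  let bits : Int := 0
  let bits := if pvCell kmap 0 0 ≠ 0 then Int.lor bits 1 else bits
  let bits := if pvCell kmap 0 1 ≠ 0 then Int.lor bits 2 else bits
  let bits := if pvCell kmap 1 0 ≠ 0 then Int.lor bits 4 else bits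
  let bits := if pvCell kmap 1 1 ≠ 0 then Int.lor bits 8 else bits
  let terms := [(1 : Int), 2, 4, 8].foldl
    (fun acc mask => if Int.land bits mask ≠ 0 then acc ++ [pvBitfieldTable mask] else acc) []
  PySem.Str.join " + " terms

-- ===== PORT B =====
def bitfield_encode_alt (kmap : List (List Int)) : String :=
  let labels : List (Int × Int × String) :=
    [(0, 0, "A'B'"), (0, 1, "A'B"), (1, 0, "AB'"), (1, 1, "AB")]
  PySem.Str.join " + "
    (labels.filterMap (fun t => if pvCell kmap t.1 t.2.1 ≠ 0 then some t.2.2 else none))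

-- ===== PRECONDITION & SPEC =====
-- Pre_ excludes exactly the malformed grids (fewer than 2 rows, or row 0/1 shorter than 2) on which Python A raises IndexError.
def Pre_bitfield_encode (kmap : List (List Int)) : Prop :=
  2 ≤ kmap.length ∧ ∀ r ∈ kmap.take 2, 2 ≤ r.length
instance (kmap : List (List Int)) : Decidable (Pre_bitfield_encode kmap) := by
  unfold Pre_bitfield_encode; infer_instance
def pvWitness_bitfield_encode : List (List Int) := [[0, 1], [1, 1]]

def Spec_bitfield_encode (kmap : List (List Int)) (out : String) : Prop := out = bitfield_encode_alt kmap
instance (kmap : List (List Int)) (out : String) : Decidable (Spec_bitfield_encode kmap out) := by unfold Spec_bitfield_encode; infer_instance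

-- ===== CLAIM (what is proved, stated in full; the proofs are below) =====
def Claim_equal_bitfield_encode : Prop := ∀ (kmap : List (List Int)), Dom_bitfield_encode kmap → Pre_bitfield_encode kmap → Spec_bitfield_encode kmap (bitfield_encode kmap)

-- ===== LEMMAS AND PROOFS =====
theorem pvCell_cons (a b : Int) (r0t : List Int) (c d : Int) (r1t : List Int)
    (rest : List (List Int)) :
    pvCell ((a :: b :: r0t) :: (c :: d :: r1t) :: rest) 0 0 = a ∧
    pvCell ((a :: b :: r0t) :: (c :: d :: r1t) :: rest) 0 1 = b ∧
    pvCell ((a :: b :: r0t) :: (c :: d :: r1t) :: rest) 1 0 = c ∧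
    pvCell ((a :: b :: r0t) :: (c :: d :: r1t) :: rest) 1 1 = d := by
  refine ⟨?_, ?_, ?_, ?_⟩ <;> simp [pvCell, pysem]

-- ===== VERDICT (by name: the statement is the Claim_ definition above) =====
theorem bitfield_encode_spec : Claim_equal_bitfield_encode := by
  intro kmap _ hpre
  obtain ⟨hlen, hrows⟩ := hpre
  match kmap with
  | [] => simp at hlen
  | [_] => simp at hlen
  | r0 :: r1 :: rest =>
    have h0 : 2 ≤ r0.length := hrows r0 (by simp)
    have h1 : 2 ≤ r1.length := hrows r1 (by simp)
    match r0, r1 with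
    | [], _ => simp at h0
    | [_], _ => simp at h0
    | _ :: _ :: _, [] => simp at h1
    | _ :: _ :: _, [_] => simp at h1
    | a :: b :: r0t, c :: d :: r1t =>
      obtain ⟨ha, hb, hc, hd⟩ := pvCell_cons a b r0t c d r1t rest
      show bitfield_encode _ = bitfield_encode_alt _
      by_cases e1 : a = 0 <;> by_cases e2 : b = 0 <;> by_cases e3 : c = 0 <;> by_cases e4 : d = 0 <;>
        (simp only [bitfield_encode, bitfield_encode_alt, List.filterMap_cons, List.filterMap_nil, ha, hb, hc, hd];
         simp only [e1, e2, e3, e4, ne_eq, not_true_eq_false, not_false_eq_true,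
           ite_true, ite_false];
         decide)
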